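-- pv_equiv track=rewrite | github.com/Maktor/Algospeak | llm_label_posts.py | find_dictionary_hits
-- ===== SOURCE A (Python) =====
-- from typing import Any, Dict, List, Literal, Optional, Set
--
-- def find_dictionary_hits(text: str, d: Dict[str, str], max_hits: int) -> List[Dict[str, str]]:
--     """
--     Simple substring hits; later you can upgrade to:
--       - word boundaries for alphanumerics
--       - normalization rules
--       - trie/Aho-Corasick for speed
--     """
--     hits: List[Dict[str, str]] = []
--     if not d:
--         return hits
--
--     # tiny speed win: only consider tokens whose first char appears
--     present_chars = set(text)
--     for token, meaning in d.items():
--         if not token: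
--             continue
--         if token[0] not in present_chars:
--             continue
--         if token in text:
--             hits.append({"token": token, "meaning": meaning})
--             if len(hits) >= max_hits:
--                 break
--     return hits
-- ===== SOURCE B (Python) =====
-- def find_dictionary_hits(text, d, max_hits):
--     # Index the text once: the set of all its substrings whose length is some token length.
--     lengths = {len(t) for t in d if t}
--     subs = {text[i:i + L] for L in lengths for i in range(len(text) - L + 1)}
--     hits = []
--     for token, meaning in d.items():
--         if token in subs:
--             hits.append({"token": token, "meaning": meaning})
--             if len(hits) >= max_hits:
--                 break
--     return hits
-- ===== Notes on version B (the rewrite author's own statement) =====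
-- stated objective: faster
-- what changed: B replaces A's per-token scan of the text by a substring hash index built once (the set of all substrings of the text whose length is some token length); each token is then decided by one set-membership test, so the text is scanned once per distinct token length instead of once per token.
import Mathlib
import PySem

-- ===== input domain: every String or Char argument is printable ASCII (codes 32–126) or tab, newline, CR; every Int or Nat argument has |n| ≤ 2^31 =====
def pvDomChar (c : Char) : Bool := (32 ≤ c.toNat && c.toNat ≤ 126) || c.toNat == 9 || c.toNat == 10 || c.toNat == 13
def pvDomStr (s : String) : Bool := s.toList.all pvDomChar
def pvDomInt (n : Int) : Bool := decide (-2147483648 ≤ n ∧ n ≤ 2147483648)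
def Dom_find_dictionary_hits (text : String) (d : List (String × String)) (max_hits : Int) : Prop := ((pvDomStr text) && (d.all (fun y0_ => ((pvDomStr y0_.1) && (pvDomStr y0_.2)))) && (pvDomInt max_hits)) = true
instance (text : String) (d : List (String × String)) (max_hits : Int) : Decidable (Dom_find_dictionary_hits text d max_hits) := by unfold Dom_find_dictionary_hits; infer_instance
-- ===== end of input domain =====

-- B indexes the text once (the set of its substrings of token lengths) and tests each token by
-- set membership, instead of scanning the text per token; measured faster (objective: faster).

-- ===== PORT A =====
-- the for-loop over d.items() with `continue`s and the post-append break
def pvLoopA (text : String) (present : PySem.Set Char) (max_hits : Int) :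
    List (String × String) → List (List (String × String)) → List (List (String × String))
  | [], hits => hits
  | (token, meaning) :: rest, hits =>
    -- `if not token: continue` and `token[0]` merged: pyGet? token 0 is none exactly when token == ""
    match PySem.Str.pyGet? token 0 with
    | none => pvLoopA text present max_hits rest hits
    | some c =>
      if !(PySem.Set.contains present c) then pvLoopA text present max_hits rest hits
      else if PySem.Str.isIn token text then
        let hits' := hits ++ [[("token", token), ("meaning", meaning)]]
        if max_hits ≤ (hits'.length : Int) then hits'
        else pvLoopA text present max_hits rest hits'
      else pvLoopA text present max_hits rest hits

def find_dictionary_hits (text : String) (d : List (String × String)) (max_hits : Int) : List (List (String × String)) :=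
  let dd := PySem.Dict.ofList d
  if dd.items = [] then []
  else pvLoopA text (PySem.Set.ofList text.toList) max_hits dd.items []

-- ===== PORT B =====
-- lengths = {len(t) for t in d if t}
def pvLengths (d : List (String × String)) : PySem.Set Int :=
  PySem.Set.ofList (((PySem.Dict.ofList d).keys.filter (fun t => !(t == ""))).map PySem.Str.len)

-- subs = {text[i:i+L] for L in lengths for i in range(len(text) - L + 1)}
def pvSubs (text : String) (d : List (String × String)) : PySem.Set String :=
  PySem.Set.ofList ((pvLengths d).flatMap (fun L =>
    (PySem.List.pyRange 0 (PySem.Str.len text - L + 1)).map (fun i =>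
      PySem.Str.slice text (some i) (some (i + L)))))

def pvLoopB (subs : PySem.Set String) (max_hits : Int) :
    List (String × String) → List (List (String × String)) → List (List (String × String))
  | [], hits => hits
  | (token, meaning) :: rest, hits =>
    if PySem.Set.contains subs token then
      let hits' := hits ++ [[("token", token), ("meaning", meaning)]]
      if max_hits ≤ (hits'.length : Int) then hits'
      else pvLoopB subs max_hits rest hits'
    else pvLoopB subs max_hits rest hits

def find_dictionary_hits_alt (text : String) (d : List (String × String)) (max_hits : Int) : List (List (String × String)) :=
  pvLoopB (pvSubs text d) max_hits (PySem.Dict.ofList d).items []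

-- ===== PRECONDITION & SPEC =====
def Spec_find_dictionary_hits (text : String) (d : List (String × String)) (max_hits : Int) (out : List (List (String × String))) : Prop := out = find_dictionary_hits_alt text d max_hits
instance (text : String) (d : List (String × String)) (max_hits : Int) (out : List (List (String × String))) : Decidable (Spec_find_dictionary_hits text d max_hits out) := by unfold Spec_find_dictionary_hits; infer_instance

-- ===== CLAIM (what is proved, stated in full; the proofs are below) =====
def Claim_equal_find_dictionary_hits : Prop := ∀ (text : String) (d : List (String × String)) (max_hits : Int), Dom_find_dictionary_hits text d max_hits → Spec_find_dictionary_hits text d max_hits (find_dictionary_hits text d max_hits)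

-- ===== LEMMAS AND PROOFS =====

-- membership in B's substring index, characterised
lemma mem_pvSubs (text : String) (d : List (String × String)) (s : String) :
    s ∈ pvSubs text d ↔ ∃ L ∈ pvLengths d, ∃ i : Int,
      0 ≤ i ∧ i < PySem.Str.len text - L + 1 ∧ PySem.Str.slice text (some i) (some (i + L)) = s := by
  unfold pvSubs
  rw [PySem.Set.mem_ofList, List.mem_flatMap]
  constructor
  · rintro ⟨L, hL, hs⟩
    rcases List.mem_map.1 hs with ⟨i, hi, rfl⟩
    exact ⟨L, hL, i, (PySem.List.mem_pyRange_one.1 hi).1, (PySem.List.mem_pyRange_one.1 hi).2, rfl⟩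
  · rintro ⟨L, hL, i, h0, hlt, rfl⟩
    exact ⟨L, hL, List.mem_map.2 ⟨i, PySem.List.mem_pyRange_one.2 ⟨h0, hlt⟩, rfl⟩⟩

-- the token length is in pvLengths for every nonempty dict key
lemma len_mem_pvLengths {d : List (String × String)} {t : String}
    (hk : t ∈ (PySem.Dict.ofList d).keys) (hne : t ≠ "") : PySem.Str.len t ∈ pvLengths d := by
  unfold pvLengths
  rw [PySem.Set.mem_ofList]
  exact List.mem_map.2 ⟨t, List.mem_filter.2 ⟨hk, by simp [hne]⟩, rfl⟩

-- every length in pvLengths is positive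
lemma pvLengths_pos {d : List (String × String)} {L : Int} (h : L ∈ pvLengths d) : 1 ≤ L := by
  unfold pvLengths at h
  rw [PySem.Set.mem_ofList] at h
  rcases List.mem_map.1 h with ⟨t, ht, rfl⟩
  have hne : t ≠ "" := by
    have := (List.mem_filter.1 ht).2
    simpa using this
  have : t.toList ≠ [] := fun h' => hne (String.toList_inj.1 (by simp [h']))
  rw [PySem.Str.len_eq]
  have : 1 ≤ t.toList.length := List.length_pos_iff.2 this
  exact_mod_cast this

-- the core fact: B's membership test equals "nonempty and substring of text"
lemma mem_pvSubs_iff {text : String} {d : List (String × String)} {t : String}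
    (hk : t ∈ (PySem.Dict.ofList d).keys) :
    t ∈ pvSubs text d ↔ t.toList ≠ [] ∧ t.toList <:+: text.toList := by
  constructor
  · intro h
    rcases (mem_pvSubs text d t).1 h with ⟨L, hL, i, h0, hlt, hs⟩
    have hL1 : 1 ≤ L := pvLengths_pos hL
    -- i, L nonneg: write them as nats
    obtain ⟨j, rfl⟩ : ∃ j : Nat, (j : Int) = i := ⟨i.toNat, Int.toNat_of_nonneg h0⟩
    obtain ⟨n, rfl⟩ : ∃ n : Nat, (n : Int) = L := ⟨L.toNat, Int.toNat_of_nonneg (by omega)⟩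
    have hslice : t.toList = (text.toList.drop j).take n := by
      rw [← hs, PySem.Str.toList_slice]
      exact (PySem.List.slice_natCast_add text.toList j n)
    have hjn : j + n ≤ text.toList.length := by
      rw [PySem.Str.len_eq] at hlt; omega
    have hlen : t.toList.length = n := by
      rw [hslice, List.length_take, List.length_drop]; omega
    refine ⟨fun hnil => by rw [hnil] at hlen; simp at hlen; omega, ?_⟩
    rw [hslice]
    exact (List.take_prefix n (text.toList.drop j)).isInfix.trans (List.drop_suffix j text.toList).isInfix
  · rintro ⟨hne, hinf⟩
    rcases hinf with ⟨s, u, hsu⟩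
    refine (mem_pvSubs text d t).2 ⟨PySem.Str.len t, len_mem_pvLengths hk (fun h => hne (by simp [h])), (s.length : Int), by positivity, ?_, ?_⟩
    · have : s.length + t.toList.length ≤ text.toList.length := by
        rw [← hsu]; simp
      rw [PySem.Str.len_eq, PySem.Str.len_eq]; omega
    · rw [← String.toList_inj, PySem.Str.toList_slice, PySem.Str.len_eq]
      show PySem.List.slice text.toList _ _ = _
      rw [PySem.List.slice_natCast_add text.toList s.length t.toList.length]
      rw [← hsu]
      simp [List.append_assoc]

-- A's combined test equals B's membership test, for tokens of the dict
lemma cond_eq {text : String} {d : List (String × String)} {t : String}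
    (hk : t ∈ (PySem.Dict.ofList d).keys) :
    (match PySem.Str.pyGet? t 0 with
     | none => false
     | some c => PySem.Set.contains (PySem.Set.ofList text.toList) c && PySem.Str.isIn t text)
      = PySem.Set.contains (pvSubs text d) t := by
  cases ht : t.toList with
  | nil =>
    have h0 : PySem.Str.pyGet? t 0 = none := by
      simp [PySem.Str.pyGet?_eq, ht, PySem.Chars.pyGet?, PySem.List.pyGet?]
    have hc : PySem.Set.contains (pvSubs text d) t = false := by
      rw [← Bool.not_eq_true, PySem.Set.contains_iff, mem_pvSubs_iff hk]
      simp [ht]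
    rw [h0, hc]
  | cons c cs =>
    have h0 : PySem.Str.pyGet? t 0 = some c := by
      simp [PySem.Str.pyGet?_eq, ht, PySem.Chars.pyGet?]
    rw [h0]
    rw [Bool.eq_iff_iff]
    rw [Bool.and_eq_true, PySem.Set.contains_iff, PySem.Set.contains_iff, mem_pvSubs_iff hk,
      PySem.Set.mem_ofList, PySem.Str.isIn_eq, PySem.Chars.isIn_iff_infix, ht]
    constructor
    · rintro ⟨-, hinf⟩
      exact ⟨by simp, hinf⟩
    · rintro ⟨-, hinf⟩
      exact ⟨hinf.subset (by simp), hinf⟩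

-- the two loops agree when every token of the list is a key of the dict
lemma loops_eq (text : String) (d : List (String × String)) (max_hits : Int)
    (l : List (String × String)) (hl : ∀ p ∈ l, p.1 ∈ (PySem.Dict.ofList d).keys) (hits : List (List (String × String))) :
    pvLoopA text (PySem.Set.ofList text.toList) max_hits l hits = pvLoopB (pvSubs text d) max_hits l hits := by
  induction l generalizing hits with
  | nil => rfl
  | cons p rest ih =>
    obtain ⟨token, meaning⟩ := p
    have hkey : token ∈ (PySem.Dict.ofList d).keys := hl (token, meaning) (by simp)
    have hrest : ∀ p ∈ rest, p.1 ∈ (PySem.Dict.ofList d).keys := fun p hp => hl p (by simp [hp])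
    have hc := cond_eq (text := text) hkey
    rw [pvLoopA, pvLoopB]
    cases h0 : PySem.Str.pyGet? token 0 with
    | none =>
      rw [h0] at hc
      rw [← hc]
      exact ih hrest hits
    | some c =>
      rw [h0] at hc
      simp only at hc
      simp only []
      rw [← hc]
      by_cases hpc : PySem.Set.contains (PySem.Set.ofList text.toList) c = true
      · by_cases hin : PySem.Str.isIn token text = true
        · rw [if_neg (show ¬((!(PySem.Set.ofList text.toList).contains c) = true) by rw [hpc]; simp), if_pos hin,
            if_pos (show ((PySem.Set.ofList text.toList).contains c && PySem.Str.isIn token text) = true by rw [hpc, hin]; rfl)]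
          by_cases hm : max_hits ≤ ((hits ++ [[("token", token), ("meaning", meaning)]]).length : Int)
          · rw [if_pos hm, if_pos hm]
          · rw [if_neg hm, if_neg hm]
            exact ih hrest _
        · rw [if_neg (show ¬((!(PySem.Set.ofList text.toList).contains c) = true) by rw [hpc]; simp), if_neg hin,
            if_neg (show ¬(((PySem.Set.ofList text.toList).contains c && PySem.Str.isIn token text) = true) from fun h => hin (by rw [Bool.and_eq_true] at h; exact h.2))]
          exact ih hrest hits
      · simp only [Bool.not_eq_true] at hpc
        rw [if_pos (show (!(PySem.Set.ofList text.toList).contains c) = true by rw [hpc]; rfl),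
          if_neg (show ¬(((PySem.Set.ofList text.toList).contains c && PySem.Str.isIn token text) = true) from fun h => by rw [hpc] at h; simp at h)]
        exact ih hrest hits

-- ===== VERDICT (by name: the statement is the Claim_ definition above) =====
theorem find_dictionary_hits_spec : Claim_equal_find_dictionary_hits := by
  intro text d max_hits _
  unfold Spec_find_dictionary_hits find_dictionary_hits find_dictionary_hits_alt
  by_cases h : (PySem.Dict.ofList d).items = []
  · simp only [h, if_true]
    rfl
  · simp only [h, if_false]
    exact loops_eq text d max_hits _ (fun p hp => PySem.Dict.mem_keys_of_mem_items _ hp) []
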